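-- pv_equiv track=rewrite | github.com/RomanPolishchenko/Python-practice | Files/Mistakes/main.py | opened_scopes
-- ===== SOURCE A (Python) =====
-- def opened_scopes(string):
--     _count_sq = 0
--     _count_fig = 0
--     for _i in string:
--         if _i is '[':
--             _count_sq += 1
--         elif _i is ']':
--             _count_sq += -1
--         if _i is '{':
--             _count_fig += 1
--         elif _i is '}':
--             _count_fig += -1
--     return _count_sq, _count_fig
-- ===== SOURCE B (Python) =====
-- def opened_scopes(string):
--     # Divide and conquer: the net-bracket counts of a string are the
--     # componentwise sums of the counts of its two halves; base cases are
--     # the empty string and single characters.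
--     if len(string) <= 1:
--         return (1 if string == '[' else -1 if string == ']' else 0,
--                 1 if string == '{' else -1 if string == '}' else 0)
--     m = len(string) // 2
--     ls, lf = opened_scopes(string[:m])
--     rs, rf = opened_scopes(string[m:])
--     return (ls + rs, lf + rf)
-- ===== Notes on version B (the rewrite author's own statement) =====
-- stated objective: alternative
-- what changed: Replaces A's single left-to-right pass with two mutable accumulators by a recursive divide-and-conquer: split the string in half, recurse on each half, and add the two result pairs componentwise; correct because the net bracket counts are additive under concatenation.
import Mathlib
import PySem

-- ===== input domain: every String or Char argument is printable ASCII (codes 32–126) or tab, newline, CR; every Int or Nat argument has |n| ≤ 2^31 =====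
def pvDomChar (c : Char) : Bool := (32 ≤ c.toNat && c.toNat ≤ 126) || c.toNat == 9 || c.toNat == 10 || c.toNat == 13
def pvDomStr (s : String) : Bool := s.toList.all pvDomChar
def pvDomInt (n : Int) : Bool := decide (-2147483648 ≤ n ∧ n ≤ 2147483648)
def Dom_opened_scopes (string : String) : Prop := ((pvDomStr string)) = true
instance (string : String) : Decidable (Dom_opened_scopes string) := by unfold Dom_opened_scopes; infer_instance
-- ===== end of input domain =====

-- B replaces the two-accumulator left-to-right loop by a divide-and-conquer recursion (halve, recurse, add pairs); an alternative of similar cost.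


-- ===== PORT A =====
-- literal transliteration: fold over the characters with the two accumulators
def opened_scopes (string : String) : Int × Int :=
  string.toList.foldl
    (fun (acc : Int × Int) _i =>
      let cs := if _i = '[' then acc.1 + 1 else if _i = ']' then acc.1 + (-1) else acc.1
      let cf := if _i = '{' then acc.2 + 1 else if _i = '}' then acc.2 + (-1) else acc.2
      (cs, cf))
    (0, 0)

-- ===== PORT B =====
-- divide and conquer on the character list; string[:m]/string[m:] with 0 ≤ m ≤ len are exactly take/drop
def openedScopesGo (l : List Char) : Int × Int :=
  if l.length ≤ 1 then
    ((if l = ['['] then 1 else if l = [']'] then -1 else 0 : Int),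
     (if l = ['{'] then 1 else if l = ['}'] then -1 else 0 : Int))
  else
    let m := l.length / 2
    let left := openedScopesGo (l.take m)
    let right := openedScopesGo (l.drop m)
    (left.1 + right.1, left.2 + right.2)
termination_by l.length
decreasing_by
  · simp only [List.length_take]; omega
  · simp only [List.length_drop]; omega

def opened_scopes_alt (string : String) : Int × Int :=
  openedScopesGo string.toList

-- ===== PRECONDITION & SPEC =====
def Spec_opened_scopes (string : String) (out : Int × Int) : Prop := out = opened_scopes_alt string
instance (string : String) (out : Int × Int) : Decidable (Spec_opened_scopes string out) := by unfold Spec_opened_scopes; infer_instance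

-- ===== CLAIM =====
def Claim_equal_opened_scopes : Prop := ∀ (string : String), Dom_opened_scopes string → Spec_opened_scopes string (opened_scopes string)

-- ===== LEMMAS AND PROOFS =====

-- B's recursion computes (count '[' - count ']', count '{' - count '}')
theorem openedScopesGo_eq (l : List Char) :
    openedScopesGo l
      = ((l.count '[' : Int) - l.count ']', (l.count '{' : Int) - l.count '}') := by
  fun_induction openedScopesGo l with
  | case1 l h =>
    interval_cases hl : l.length
    · simp_all [List.length_eq_zero_iff]
    · obtain ⟨c, rfl⟩ : ∃ c, l = [c] := by
        cases l with
        | nil => simp at hl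
        | cons x t => cases t with
          | nil => exact ⟨x, rfl⟩
          | cons y u => simp at hl
      by_cases h1 : c = '[' <;> by_cases h2 : c = ']' <;> by_cases h3 : c = '{' <;>
        by_cases h4 : c = '}' <;> simp_all
  | case2 l h m left right ih1 ih2 =>
    have key : ∀ c : Char, (l.take m).count c + (l.drop m).count c = l.count c := by
      intro c; rw [← List.count_append, List.take_append_drop]
    simp only [left, right, ih1, ih2]
    rw [Prod.ext_iff]
    refine ⟨?_, ?_⟩
    · rw [← key '[', ← key ']']; push_cast; ring
    · rw [← key '{', ← key '}']; push_cast; ring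

-- A's fold computes the same pair
set_option maxHeartbeats 2000000 in
theorem opened_scopes_loop (l : List Char) (a b : Int) :
    l.foldl
      (fun (acc : Int × Int) _i =>
        let cs := if _i = '[' then acc.1 + 1 else if _i = ']' then acc.1 + (-1) else acc.1
        let cf := if _i = '{' then acc.2 + 1 else if _i = '}' then acc.2 + (-1) else acc.2
        (cs, cf))
      (a, b)
    = (a + l.count '[' - l.count ']', b + l.count '{' - l.count '}') := by
  induction l generalizing a b with
  | nil => simp
  | cons x xs ih =>
    simp only [List.foldl_cons, ih, List.count_cons]
    split_ifs with h1 h2 h3 h4 <;> subst_vars <;> simp_all <;> omega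

-- ===== VERDICT =====
theorem opened_scopes_spec : Claim_equal_opened_scopes := by
  intro s _
  unfold Spec_opened_scopes opened_scopes opened_scopes_alt
  rw [opened_scopes_loop, openedScopesGo_eq]
  simp
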